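-- pv_equiv track=rewrite | github.com/suriyakode/question_answering | QA.py | clean_whole_example
-- ===== SOURCE A (Python) =====
-- SEQUENCE_LENGTH = 512
--
-- def clean_whole_example(context_tokens):
--
-- 	token_positions = []
-- 	tokens = []
-- 	ret_token_positions = []
-- 	ret_contexts = []
-- 	offsets = [0]
--
-- 	for i in range(len(context_tokens)):
-- 		t = context_tokens[i]
--
-- 		# only keep tokens that don't correspond to <> tags
-- 		if not t.startswith("<"):
-- 			token_positions.append(i)
-- 			tokens.append(t)
--
-- 		# start appending to a new clean_context if we've reached the max input length
-- 		if len(token_positions) == SEQUENCE_LENGTH: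
-- 			ret_token_positions.append(token_positions)
-- 			ret_contexts.append(" ".join(tokens))
-- 			tokens = []
-- 			token_positions = []
-- 			offsets.append(i)
--
-- 	ret_token_positions.append(token_positions)
-- 	ret_contexts.append(" ".join(tokens))
--
-- 	return (ret_token_positions, ret_contexts, offsets)
-- ===== SOURCE B (Python) =====
-- SEQUENCE_LENGTH = 512
--
-- def clean_whole_example(context_tokens):
-- 	# one pass to keep non-tag tokens with their original indices, then chunk that list
-- 	kept = [(i, t) for i, t in enumerate(context_tokens) if not t.startswith("<")]
-- 	chunks = []
-- 	offsets = [0]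
-- 	start = 0
-- 	while len(kept) - start >= SEQUENCE_LENGTH:
-- 		chunks.append(kept[start:start + SEQUENCE_LENGTH])
-- 		offsets.append(kept[start + SEQUENCE_LENGTH - 1][0])
-- 		start += SEQUENCE_LENGTH
-- 	chunks.append(kept[start:])
-- 	ret_token_positions = [[i for i, _ in c] for c in chunks]
-- 	ret_contexts = [" ".join(t for _, t in c) for c in chunks]
-- 	return (ret_token_positions, ret_contexts, offsets)
-- ===== Notes on version B (the rewrite author's own statement) =====
-- stated objective: alternative
-- what changed: A is a single stateful loop that buffers tokens and flushes when the buffer hits 512; B first filters the kept (index, token) pairs in one pass and then slices that list into 512-sized chunks plus an always-appended remainder, deriving positions, joined contexts and offsets from the chunks.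
import Mathlib
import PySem

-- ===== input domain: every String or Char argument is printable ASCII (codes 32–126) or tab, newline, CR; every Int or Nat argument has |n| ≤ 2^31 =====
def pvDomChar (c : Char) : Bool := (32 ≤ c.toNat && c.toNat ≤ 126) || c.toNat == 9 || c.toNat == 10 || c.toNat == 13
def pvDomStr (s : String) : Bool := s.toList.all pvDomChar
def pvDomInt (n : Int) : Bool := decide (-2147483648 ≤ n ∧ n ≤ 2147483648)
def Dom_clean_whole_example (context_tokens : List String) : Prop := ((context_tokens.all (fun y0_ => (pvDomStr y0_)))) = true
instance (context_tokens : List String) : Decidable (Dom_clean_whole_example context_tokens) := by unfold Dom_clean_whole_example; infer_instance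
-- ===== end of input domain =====

-- B replaces A's single stateful flush-at-512 loop by a filter pass followed by a chunking pass (alternative decomposition, same cost).


-- ===== PORT A =====
-- loop state: (token_positions, tokens, ret_token_positions, ret_contexts, offsets)
abbrev pvStateA := List Int × List String × List (List Int) × List String × List Int

-- the body of A's `for i in range(len(context_tokens))` loop, on (i, context_tokens[i])
def pvStepA (st : pvStateA) (p : Int × String) : pvStateA :=
  let (tp, tk, rtp, rc, offs) := st
  let (tp, tk) := if PySem.Str.startswith p.2 "<" = false then (tp ++ [p.1], tk ++ [p.2]) else (tp, tk)
  if tp.length = 512 then ([], [], rtp ++ [tp], rc ++ [PySem.Str.join " " tk], offs ++ [p.1])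
  else (tp, tk, rtp, rc, offs)

def clean_whole_example (context_tokens : List String) : List (List Int) × List String × List Int :=
  -- `t = context_tokens[i]`: i ranges over range(len(...)), always in range, so pyGetD's default is never used
  let s := (PySem.List.pyRange 0 (PySem.List.len context_tokens) 1).foldl
    (fun st i => pvStepA st (i, PySem.List.pyGetD context_tokens i "")) ([], [], [], [], [0])
  (s.2.2.1 ++ [s.1], s.2.2.2.1 ++ [PySem.Str.join " " s.2.1], s.2.2.2.2)

-- ===== PORT B =====
-- Source B's filter pass: kept (index, token) pairs
def pvKept (context_tokens : List String) : List (Int × String) :=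
  (PySem.List.enumerate context_tokens).filter (fun p => !PySem.Str.startswith p.2 "<")

-- Source B's while loop: split `kept` into full 512-chunks (collecting each chunk's last index) plus the remainder
def pvSplit (l : List (Int × String)) : List (List (Int × String)) × List Int :=
  if h : 512 ≤ l.length then
    let r := pvSplit (l.drop 512)
    (l.take 512 :: r.1, (l[511]'(by omega)).1 :: r.2)
  else ([l], [])
termination_by l.length
decreasing_by simp; omega

def clean_whole_example_alt (context_tokens : List String) : List (List Int) × List String × List Int :=
  let kept := pvKept context_tokens
  let r := pvSplit kept
  (r.1.map (fun c => c.map Prod.fst),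
   r.1.map (fun c => PySem.Str.join " " (c.map Prod.snd)),
   (0 : Int) :: r.2)

-- ===== PRECONDITION & SPEC =====
def Spec_clean_whole_example (context_tokens : List String) (out : List (List Int) × List String × List Int) : Prop := out = clean_whole_example_alt context_tokens
instance (context_tokens : List String) (out : List (List Int) × List String × List Int) : Decidable (Spec_clean_whole_example context_tokens out) := by unfold Spec_clean_whole_example; infer_instance

-- ===== CLAIM (what is proved, stated in full; the proofs are below) =====
def Claim_equal_clean_whole_example : Prop := ∀ (context_tokens : List String), Dom_clean_whole_example context_tokens → Spec_clean_whole_example context_tokens (clean_whole_example context_tokens)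

-- ===== LEMMAS AND PROOFS =====

-- A's step on a kept token, with the startswith test discharged
def pvStepK (st : pvStateA) (p : Int × String) : pvStateA :=
  let (tp, tk, rtp, rc, offs) := st
  if (tp ++ [p.1]).length = 512 then ([], [], rtp ++ [tp ++ [p.1]], rc ++ [PySem.Str.join " " (tk ++ [p.2])], offs ++ [p.1])
  else (tp ++ [p.1], tk ++ [p.2], rtp, rc, offs)

lemma pvStepA_kept (st : pvStateA) (p : Int × String)
    (h : PySem.Str.startswith p.2 "<" = false) : pvStepA st p = pvStepK st p := by
  obtain ⟨tp, tk, rtp, rc, offs⟩ := st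
  have hc : PySem.Chars.startswith p.2.toList ['<'] = false := by simpa using h
  simp [pvStepA, pvStepK, hc]

lemma pvStepA_drop (st : pvStateA) (p : Int × String)
    (h : PySem.Str.startswith p.2 "<" = true) (hlt : st.1.length < 512) : pvStepA st p = st := by
  obtain ⟨tp, tk, rtp, rc, offs⟩ := st
  have hc : PySem.Chars.startswith p.2.toList ['<'] = true := by simpa using h
  simp at hlt
  simp [pvStepA, hc, Nat.ne_of_lt hlt]

lemma pvStepK_inv (st : pvStateA) (p : Int × String) (h : st.1.length < 512) :
    (pvStepK st p).1.length < 512 := by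
  obtain ⟨tp, tk, rtp, rc, offs⟩ := st
  simp at h
  simp only [pvStepK]
  split
  · simp
  · rename_i hc
    simp at hc ⊢
    omega

-- fold over all pairs = fold over the kept pairs
lemma pv_fold_filter (l : List (Int × String)) (st : pvStateA) (h : st.1.length < 512) :
    l.foldl pvStepA st = (l.filter (fun p => !PySem.Str.startswith p.2 "<")).foldl pvStepK st := by
  induction l generalizing st with
  | nil => rfl
  | cons p l ih =>
    by_cases hp : PySem.Str.startswith p.2 "<"
    · have hc : PySem.Chars.startswith p.2.toList ['<'] = true := by simpa using hp
      simp [List.foldl_cons, hc, pvStepA_drop st p hp h, ih st h]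
    · have hp2 : PySem.Str.startswith p.2 "<" = false := by simpa using hp
      have hc : PySem.Chars.startswith p.2.toList ['<'] = false := by simpa using hp2
      have h2 : (pvStepK st p).1.length < 512 := pvStepK_inv st p h
      simp [List.foldl_cons, hc, pvStepA_kept st p hp2, ih _ h2]

-- no flush happens when the buffer plus the rest stays under 512
lemma pv_fold_small (l : List (Int × String)) (tp : List Int) (tk : List String)
    (rtp : List (List Int)) (rc : List String) (offs : List Int)
    (h : tp.length + l.length < 512) :
    l.foldl pvStepK (tp, tk, rtp, rc, offs) = (tp ++ l.map Prod.fst, tk ++ l.map Prod.snd, rtp, rc, offs) := by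
  induction l generalizing tp tk with
  | nil => simp
  | cons p l ih =>
    simp only [List.foldl_cons]
    rw [show pvStepK (tp, tk, rtp, rc, offs) p = (tp ++ [p.1], tk ++ [p.2], rtp, rc, offs) by
      simp [pvStepK]; intro hc; simp at h; omega]
    rw [ih (tp ++ [p.1]) (tk ++ [p.2]) (by simp at h ⊢; omega)]
    simp

-- exactly one flush, at the last element, when the buffer plus the rest is exactly 512
lemma pv_fold_exact (l : List (Int × String)) (hne : l ≠ []) (tp : List Int) (tk : List String)
    (rtp : List (List Int)) (rc : List String) (offs : List Int)
    (h : tp.length + l.length = 512) :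
    l.foldl pvStepK (tp, tk, rtp, rc, offs) =
      ([], [], rtp ++ [tp ++ l.map Prod.fst], rc ++ [PySem.Str.join " " (tk ++ l.map Prod.snd)],
       offs ++ [(l.getLast hne).1]) := by
  induction l generalizing tp tk with
  | nil => exact absurd rfl hne
  | cons p l ih =>
    by_cases hl : l = []
    · subst hl
      simp at h
      simp [pvStepK, h]
    · rw [List.foldl_cons]
      rw [show pvStepK (tp, tk, rtp, rc, offs) p = (tp ++ [p.1], tk ++ [p.2], rtp, rc, offs) by
        simp [pvStepK]; intro hc
        have hz : l.length = 0 := by simp at h; omega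
        exact absurd (List.eq_nil_of_length_eq_zero hz) hl]
      rw [ih hl (tp ++ [p.1]) (tk ++ [p.2]) (by simp at h ⊢; omega)]
      simp [List.getLast_cons hl]

-- assembling A's final state = B's chunk decomposition, with general accumulators
lemma pv_fold_split (n : Nat) (l : List (Int × String)) (hn : l.length ≤ n)
    (rtp : List (List Int)) (rc : List String) (offs : List Int) :
    (let s := l.foldl pvStepK ([], [], rtp, rc, offs)
     (s.2.2.1 ++ [s.1], s.2.2.2.1 ++ [PySem.Str.join " " s.2.1], s.2.2.2.2)) =
    (rtp ++ (pvSplit l).1.map (fun c => c.map Prod.fst),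
     rc ++ (pvSplit l).1.map (fun c => PySem.Str.join " " (c.map Prod.snd)),
     offs ++ (pvSplit l).2) := by
  induction n generalizing l rtp rc offs with
  | zero =>
    have hz : l = [] := List.eq_nil_of_length_eq_zero (Nat.le_zero.mp hn)
    subst hz
    simp [pvSplit]
  | succ n ih =>
    by_cases h : 512 ≤ l.length
    · have hlen : (l.take 512).length = 512 := by simp [Nat.min_eq_left h]
      have hne : l.take 512 ≠ [] := by intro hc; rw [hc] at hlen; simp at hlen
      have h511 : (511 : Nat) < l.length := by omega
      have hs : pvSplit l = (l.take 512 :: (pvSplit (l.drop 512)).1,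
          (l[511]'h511).1 :: (pvSplit (l.drop 512)).2) := by
        rw [pvSplit]; simp [h]
      have hlast : (l.take 512).getLast hne = l[511]'h511 := by
        rw [List.getLast_eq_getElem]
        simp [hlen]
      conv_lhs => rw [show l = l.take 512 ++ l.drop 512 from (List.take_append_drop 512 l).symm]
      simp only [List.foldl_append]
      rw [pv_fold_exact (l.take 512) hne [] [] rtp rc offs (by simp [hlen])]
      have hrec := ih (l.drop 512) (by simp; omega)
        (rtp ++ [[] ++ (l.take 512).map Prod.fst])
        (rc ++ [PySem.Str.join " " ([] ++ (l.take 512).map Prod.snd)])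
        (offs ++ [((l.take 512).getLast hne).1])
      simp only at hrec ⊢
      rw [hrec, hs, hlast]
      simp
    · rw [pv_fold_small l [] [] rtp rc offs (by simpa using Nat.lt_of_not_le h)]
      rw [pvSplit]
      simp [h]

-- A's fold over range(len) with indexing = fold over enumerate
lemma pv_fold_range (context_tokens : List String) (init : pvStateA) :
    (PySem.List.pyRange 0 (PySem.List.len context_tokens) 1).foldl
      (fun st i => pvStepA st (i, PySem.List.pyGetD context_tokens i "")) init =
    (PySem.List.enumerate context_tokens).foldl pvStepA init := by
  rw [PySem.List.enumerate_eq_map_pyRange (d := ""), List.foldl_map]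

-- ===== VERDICT (by name: the statement is the Claim_ definition above) =====
theorem clean_whole_example_spec : Claim_equal_clean_whole_example := by
  intro context_tokens _
  unfold Spec_clean_whole_example clean_whole_example clean_whole_example_alt
  rw [pv_fold_range,
    pv_fold_filter (PySem.List.enumerate context_tokens) ([], [], [], [], [0]) (by simp)]
  exact pv_fold_split (pvKept context_tokens).length (pvKept context_tokens) le_rfl [] [] [0]
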